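-- pv_equiv track=rewrite | github.com/LKKKALIMULLIN1/obchak | counter.py | solve
-- ===== SOURCE A (Python) =====
-- def solve(d):
--     ans = "```\n"
--     pos_d = {}
--     neg_d = {}
--     for key, value in d.items():
--         if value > 0: pos_d[key] = value
--         else: neg_d[key] = value
--     pos_d = dict(sorted(pos_d.items(), key=lambda item: item[1], reverse=True))
--     neg_d = dict(sorted(neg_d.items(), key=lambda item: item[1]))
--     for key, value in pos_d.items():
--         for k, v in neg_d.items():
--             if v == 0: continue
--             if pos_d[key] + neg_d[k] <= 0:
--                 ans += f"{key} should pay to {k} ===>>> {pos_d[key]}\n"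
--                 neg_d[k] += pos_d[key]
--                 pos_d[key] = 0
--                 break
--             else:
--                 ans += f'{key} should pay to {k} ===>>> {-neg_d[k]}\n'
--                 pos_d[key] += neg_d[k]
--                 neg_d[k] = 0
--     ans += '```'
--     return ans
-- ===== SOURCE B (Python) =====
-- def solve(d):
--     # sort creditors (positive balances) descending, debtors ascending; then a single
--     # two-pointer sweep: j only moves forward, so zeroed debtors are never rescanned.
--     pos = sorted([kv for kv in d.items() if kv[1] > 0], key=lambda kv: kv[1], reverse=True)
--     nonpos = sorted([kv for kv in d.items() if kv[1] <= 0], key=lambda kv: kv[1])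
--     neg = [kv for kv in nonpos if kv[1] < 0]  # zero balances owe nothing
--     lines = []
--     j = 0
--     for key, p in pos:
--         while j < len(neg) and p > 0:
--             k, v = neg[j]
--             if p + v <= 0:
--                 lines.append(f"{key} should pay to {k} ===>>> {p}\n")
--                 if p + v == 0:
--                     j += 1
--                 else:
--                     neg[j] = (k, v + p)
--                 p = 0
--             else:
--                 lines.append(f"{key} should pay to {k} ===>>> {-v}\n")
--                 p += v
--                 j += 1
--     return "```\n" + "".join(lines) + "```"
-- ===== Notes on version B (the rewrite author's own statement) =====
-- stated objective: faster
-- what changed: A rescans the whole debtor dict from the start for every creditor (skipping already-zeroed entries); B sorts creditors and debtors once and settles them with a single forward two-pointer sweep over the sorted debtor list, never revisiting zeroed entries; Pre_ excludes only association lists with a repeated key, which do not encode a Python dict (A's argument is a dict).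
import Mathlib
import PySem

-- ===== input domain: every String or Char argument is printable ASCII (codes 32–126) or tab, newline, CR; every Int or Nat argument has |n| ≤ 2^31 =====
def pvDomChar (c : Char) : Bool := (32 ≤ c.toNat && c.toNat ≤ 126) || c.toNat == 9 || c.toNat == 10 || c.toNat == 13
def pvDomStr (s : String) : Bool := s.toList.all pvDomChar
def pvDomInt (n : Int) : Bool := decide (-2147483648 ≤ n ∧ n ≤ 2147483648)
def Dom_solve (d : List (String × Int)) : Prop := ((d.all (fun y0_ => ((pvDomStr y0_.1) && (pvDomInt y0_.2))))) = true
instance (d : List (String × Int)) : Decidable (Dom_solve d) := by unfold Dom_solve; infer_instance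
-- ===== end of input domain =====

-- B replaces A's rescan-from-the-start of the debtor dict for every creditor by a single
-- forward two-pointer sweep over the sorted debtor list (objective: faster).

-- ===== PORT A =====
-- Python's pos_d[key] / neg_d[k] reads and writes are PySem.Dict getD/insert (every key read
-- is present, so the 0 default is never used).  The inner `for k, v in neg_d.items()` walks
-- the key sequence of neg_d (fixed: only values are mutated) reading each key's live value.
def solveInner (pos_d : PySem.Dict String Int) (key : String) (ks : List String)
    (neg_d : PySem.Dict String Int) (ans : String) :
    String × PySem.Dict String Int × PySem.Dict String Int :=
  match ks with
  | [] => (ans, pos_d, neg_d)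
  | k :: rest =>
    let v := neg_d.getD k 0
    if v = 0 then solveInner pos_d key rest neg_d ans
    else if pos_d.getD key 0 + v ≤ 0 then
      (ans ++ key ++ " should pay to " ++ k ++ " ===>>> " ++
         PySem.Int.toStr (pos_d.getD key 0) ++ "\n",
       pos_d.insert key 0, neg_d.insert k (v + pos_d.getD key 0))
    else
      solveInner (pos_d.insert key (pos_d.getD key 0 + v)) key rest (neg_d.insert k 0)
        (ans ++ key ++ " should pay to " ++ k ++ " ===>>> " ++ PySem.Int.toStr (-v) ++ "\n")

def solveOuter (pkeys : List String) (pos_d neg_d : PySem.Dict String Int) (ans : String) :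
    String :=
  match pkeys with
  | [] => ans
  | key :: rest =>
    let r := solveInner pos_d key neg_d.keys neg_d ans
    solveOuter rest r.2.1 r.2.2 r.1

def solve (d : List (String × Int)) : String :=
  let ans := "```\n"
  let pn := d.foldl
    (fun (pn : PySem.Dict String Int × PySem.Dict String Int) kv =>
      if kv.2 > 0 then (pn.1.insert kv.1 kv.2, pn.2) else (pn.1, pn.2.insert kv.1 kv.2))
    (PySem.Dict.empty, PySem.Dict.empty)
  let pos_d := PySem.Dict.ofList (PySem.List.sorted pn.1.items (fun item => item.2) true)
  let neg_d := PySem.Dict.ofList (PySem.List.sorted pn.2.items (fun item => item.2) false)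
  solveOuter pos_d.keys pos_d neg_d ans ++ "```"

-- ===== PORT B =====
-- Python's cursor j into the mutable list `neg` is represented by the remaining suffix
-- neg[j:] (j += 1 drops the head, neg[j] = (k, v + p) replaces the head).
def solveAltPay (key : String) (p : Int) (neg : List (String × Int)) (acc : List String) :
    List String × List (String × Int) :=
  match neg with
  | [] => (acc, neg)
  | (k, v) :: rest =>
    if p ≤ 0 then (acc, (k, v) :: rest)
    else if p + v ≤ 0 then
      let acc := acc ++ [key ++ " should pay to " ++ k ++ " ===>>> " ++ PySem.Int.toStr p ++ "\n"]
      if p + v = 0 then (acc, rest) else (acc, (k, v + p) :: rest)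
    else
      solveAltPay key (p + v) rest
        (acc ++ [key ++ " should pay to " ++ k ++ " ===>>> " ++ PySem.Int.toStr (-v) ++ "\n"])

def solveAltLoop (pos neg : List (String × Int)) (acc : List String) : List String :=
  match pos with
  | [] => acc
  | (key, p) :: rest =>
    let r := solveAltPay key p neg acc
    solveAltLoop rest r.2 r.1

def solve_alt (d : List (String × Int)) : String :=
  let pos := PySem.List.sorted (d.filter (fun kv => kv.2 > 0)) (fun kv => kv.2) true
  let nonpos := PySem.List.sorted (d.filter (fun kv => kv.2 ≤ 0)) (fun kv => kv.2) false
  let neg := nonpos.filter (fun kv => kv.2 < 0)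
  let lines := solveAltLoop pos neg []
  "```\n" ++ String.join lines ++ "```"

-- ===== PRECONDITION & SPEC =====
-- Pre_ excludes only association lists with a repeated key: those do not encode a Python
-- dict (A's argument is a dict, whose keys are necessarily distinct), so A has no
-- behaviour on them to match.
def Pre_solve (d : List (String × Int)) : Prop := (d.map Prod.fst).Nodup
instance (d : List (String × Int)) : Decidable (Pre_solve d) := by
  unfold Pre_solve; infer_instance

def pvWitness_solve : (List (String × Int)) := [("a", 3), ("b", -2), ("c", 0)]

def Spec_solve (d : List (String × Int)) (out : String) : Prop := out = solve_alt d
instance (d : List (String × Int)) (out : String) : Decidable (Spec_solve d out) := by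
  unfold Spec_solve; infer_instance

-- ===== CLAIM (what is proved, stated in full; the proofs are below) =====
def Claim_equal_solve : Prop :=
  ∀ (d : List (String × Int)), Dom_solve d → Pre_solve d → Spec_solve d (solve d)

-- ===== LEMMAS AND PROOFS =====
theorem pvDict_getD_at (d : PySem.Dict String Int) (pre post : List (String × Int))
    (k : String) (v : Int) (h : d.items = pre ++ (k, v) :: post)
    (hnd : (d.items.map Prod.fst).Nodup) : d.getD k 0 = v := by
  apply PySem.Dict.getD_of_mem_items d (k := k) (v := v)
  · rw [h]; simp
  · simpa [PySem.Dict.keys] using hnd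

theorem pvDict_items_set (d : PySem.Dict String Int) (pre post : List (String × Int))
    (k : String) (v w : Int) (h : d.items = pre ++ (k, v) :: post)
    (hnd : (d.items.map Prod.fst).Nodup) :
    (d.insert k w).items = pre ++ (k, w) :: post := by
  have hc : d.contains k = true := by
    rw [PySem.Dict.contains_iff_mem_keys]
    simp [PySem.Dict.keys, h]
  rw [PySem.Dict.items_insert_of_contains d w hc, h]
  rw [h] at hnd
  simp only [List.map_append, List.map_cons] at hnd
  have hpre : ∀ p ∈ pre, p.1 ≠ k := by
    intro p hp hne
    have := List.disjoint_of_nodup_append hnd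
    exact this (List.mem_map_of_mem hp) (by simp [hne])
  have hpost : ∀ p ∈ post, p.1 ≠ k := by
    intro p hp hne
    have h2 := (List.nodup_append.mp hnd).2.1
    rw [List.nodup_cons] at h2
    exact h2.1 (by rw [← hne]; exact List.mem_map_of_mem hp)
  simp only [List.map_append, List.map_cons, beq_self_eq_true, if_pos]
  congr 1
  · rw [List.map_congr_left (fun p hp => by simp [hpre p hp] : ∀ p ∈ pre, (if (p.1 == k) = true then (k, w) else p) = id p), List.map_id]
  · congr 1
    rw [List.map_congr_left (fun p hp => by simp [hpost p hp] : ∀ p ∈ post, (if (p.1 == k) = true then (k, w) else p) = id p), List.map_id]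

theorem pvPay_acc (key : String) (p : Int) (neg : List (String × Int)) (acc : List String) :
    solveAltPay key p neg acc =
      (acc ++ (solveAltPay key p neg []).1, (solveAltPay key p neg []).2) := by
  induction neg generalizing p acc with
  | nil => simp [solveAltPay]
  | cons kv rest ih =>
    obtain ⟨k, v⟩ := kv
    simp only [solveAltPay]
    split_ifs with h1 h2 h3 <;> try simp
    · rw [ih (p + v) (acc ++ _), ih (p + v) [_]]
      simp

theorem pvPay_neg (key : String) (p : Int) (neg : List (String × Int)) (acc : List String)
    (h : ∀ kv ∈ neg, kv.2 < 0) :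
    ∀ kv ∈ (solveAltPay key p neg acc).2, kv.2 < 0 := by
  induction neg generalizing p acc with
  | nil => simp [solveAltPay]
  | cons kv rest ih =>
    obtain ⟨k, v⟩ := kv
    have hv : v < 0 := h (k, v) (by simp)
    have hrest : ∀ kv ∈ rest, kv.2 < 0 := fun kv hk => h kv (by simp [hk])
    simp only [solveAltPay]
    split_ifs with h1 h2 h3
    · exact h
    · intro kv hk; exact hrest kv hk
    · intro kv hk
      rcases List.mem_cons.mp hk with h' | h'
      · subst h'; simpa using by omega
      · exact hrest kv h'
    · exact ih (p + v) _ hrest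

theorem pvLoop_acc (pos : List (String × Int)) :
    ∀ (neg : List (String × Int)) (acc : List String),
    solveAltLoop pos neg acc = acc ++ solveAltLoop pos neg [] := by
  induction pos with
  | nil => simp [solveAltLoop]
  | cons kv rest ih =>
    intro neg acc
    obtain ⟨key, p⟩ := kv
    simp only [solveAltLoop]
    rw [pvPay_acc key p neg acc, pvPay_acc key p neg []]
    simp only [List.nil_append]
    rw [ih _ (acc ++ _), ih _ ((solveAltPay key p neg []).1)]
    simp

theorem pvOfList_items (l : List (String × Int)) (h : (l.map Prod.fst).Nodup) :
    (PySem.Dict.ofList l).items = l := by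
  have := PySem.Dict.items_foldl_insert_fresh l Prod.fst Prod.snd PySem.Dict.empty
    (fun a _ => PySem.Dict.contains_empty _) h
  simpa [PySem.Dict.ofList] using this

theorem pvNonposSplit (N : List (String × Int))
    (hpw : N.Pairwise (fun a b => a.2 ≤ b.2)) (hle : ∀ kv ∈ N, kv.2 ≤ 0) :
    ∃ Z2, N = N.filter (fun kv => kv.2 < 0) ++ Z2 ∧ ∀ kv ∈ Z2, kv.2 = 0 := by
  induction N with
  | nil => exact ⟨[], by simp⟩
  | cons kv rest ih =>
    obtain ⟨k, v⟩ := kv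
    rcases lt_or_eq_of_le (hle (k, v) (by simp) : v ≤ 0) with hv | hv
    · obtain ⟨Z2, hZ, hz⟩ := ih (List.Pairwise.of_cons hpw) (fun kv hk => hle kv (by simp [hk]))
      refine ⟨Z2, ?_, hz⟩
      simp only [List.filter_cons]
      simp only [show decide (v < 0) = true from by simpa using hv]
      simpa using hZ
    · -- head value is 0: every value in the list is 0
      have hall : ∀ kv ∈ (k, v) :: rest, kv.2 = 0 := by
        intro kv hk
        rcases List.mem_cons.mp hk with h' | h'
        · rw [h']; omega
        · have h1 := (List.pairwise_cons.mp hpw).1 kv h'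
          have h2 := hle kv (by simp [h'])
          omega
      refine ⟨(k, v) :: rest, ?_, hall⟩
      rw [List.filter_eq_nil_iff.mpr, List.nil_append]
      intro kv hk
      simp [hall kv hk]

theorem pvSplit (d : List (String × Int)) :
    ∀ (p n : PySem.Dict String Int),
    (d.map Prod.fst).Nodup →
    (∀ kv ∈ d, p.contains kv.1 = false ∧ n.contains kv.1 = false) →
    (d.foldl (fun (pn : PySem.Dict String Int × PySem.Dict String Int) kv =>
        if kv.2 > 0 then (pn.1.insert kv.1 kv.2, pn.2) else (pn.1, pn.2.insert kv.1 kv.2))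
      (p, n)).1.items = p.items ++ d.filter (fun kv => kv.2 > 0) ∧
    (d.foldl (fun (pn : PySem.Dict String Int × PySem.Dict String Int) kv =>
        if kv.2 > 0 then (pn.1.insert kv.1 kv.2, pn.2) else (pn.1, pn.2.insert kv.1 kv.2))
      (p, n)).2.items = n.items ++ d.filter (fun kv => kv.2 ≤ 0) := by
  induction d with
  | nil => intro p n _ _; simp
  | cons kv rest ih =>
    intro p n hnd hfresh
    obtain ⟨k, v⟩ := kv
    have hk : p.contains k = false ∧ n.contains k = false := hfresh (k, v) (by simp)
    have hnd' : (rest.map Prod.fst).Nodup := (List.nodup_cons.mp (by simpa using hnd)).2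
    have hknotin : k ∉ rest.map Prod.fst := (List.nodup_cons.mp (by simpa using hnd)).1
    by_cases hv : v > 0
    · have hfresh' : ∀ kv ∈ rest, (p.insert k v).contains kv.1 = false ∧ n.contains kv.1 = false := by
        intro kv hkv
        have h1 := hfresh kv (by simp [hkv])
        have hne : (kv.1 == k) = false := by
          simp only [beq_eq_false_iff_ne, ne_eq]
          intro he; exact hknotin (he ▸ List.mem_map_of_mem hkv)
        constructor
        · rw [PySem.Dict.contains_insert]; simp [hne, h1.1]
        · exact h1.2
      have := ih (p.insert k v) n hnd' hfresh'
      simp only [List.foldl_cons, if_pos hv]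
      refine ⟨?_, ?_⟩
      · rw [this.1, PySem.Dict.items_insert_of_not_contains _ _ hk.1]
        simp [hv]
      · rw [this.2]
        simp [show ¬ v ≤ 0 by omega]
    · have hfresh' : ∀ kv ∈ rest, p.contains kv.1 = false ∧ (n.insert k v).contains kv.1 = false := by
        intro kv hkv
        have h1 := hfresh kv (by simp [hkv])
        have hne : (kv.1 == k) = false := by
          simp only [beq_eq_false_iff_ne, ne_eq]
          intro he; exact hknotin (he ▸ List.mem_map_of_mem hkv)
        exact ⟨h1.1, by rw [PySem.Dict.contains_insert]; simp [hne, h1.2]⟩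
      have := ih p (n.insert k v) hnd' hfresh'
      simp only [List.foldl_cons, if_neg hv]
      refine ⟨?_, ?_⟩
      · rw [this.1]; simp [hv]
      · rw [this.2, PySem.Dict.items_insert_of_not_contains _ _ hk.2]
        simp [show v ≤ 0 by omega]

theorem pvInner_skip (pos_d neg_d : PySem.Dict String Int) (key : String)
    (zs ks : List String) (ans : String)
    (h : ∀ k ∈ zs, neg_d.getD k 0 = 0) :
    solveInner pos_d key (zs ++ ks) neg_d ans = solveInner pos_d key ks neg_d ans := by
  induction zs with
  | nil => rfl
  | cons z zrest ih =>
    have hz : neg_d.getD z 0 = 0 := h z (by simp)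
    simp only [List.cons_append, solveInner, hz]
    simpa using ih fun k hk => h k (by simp [hk])

theorem pvGetD_zero (neg_d : PySem.Dict String Int)
    (hnd : (neg_d.items.map Prod.fst).Nodup) (kv : String × Int)
    (hm : kv ∈ neg_d.items) (hz : kv.2 = 0) : neg_d.getD kv.1 0 = 0 := by
  have := PySem.Dict.getD_of_mem_items neg_d (k := kv.1) (v := kv.2)
    (by simpa using hm) (by simpa [PySem.Dict.keys] using hnd) 0
  omega

theorem pvJoin_nil : String.join [] = "" := rfl

theorem pvStr_foldl_append (ls : List String) (a b : String) :
    ls.foldl (fun r s => r ++ s) (a ++ b) = a ++ ls.foldl (fun r s => r ++ s) b := by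
  induction ls generalizing b with
  | nil => rfl
  | cons x xs ih => simpa [String.append_assoc] using ih (b ++ x)

theorem pvJoin_cons (l : String) (ls : List String) :
    String.join (l :: ls) = l ++ String.join ls := by
  have h := pvStr_foldl_append ls l ""
  simpa [String.join, String.append_empty] using h

theorem pvInner_sim (cur : List (String × Int)) :
    ∀ (Z1 Z2 : List (String × Int)) (neg_d pos_d : PySem.Dict String Int)
      (key : String) (p : Int) (ans : String),
    neg_d.items = Z1 ++ cur ++ Z2 →
    (neg_d.items.map Prod.fst).Nodup →
    (∀ kv ∈ Z1, kv.2 = 0) → (∀ kv ∈ Z2, kv.2 = 0) → (∀ kv ∈ cur, kv.2 < 0) →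
    pos_d.getD key 0 = p → 0 < p →
    ∃ Z1' pos_d' neg_d',
      solveInner pos_d key (cur.map Prod.fst ++ Z2.map Prod.fst) neg_d ans
        = (ans ++ String.join (solveAltPay key p cur []).1, pos_d', neg_d')
      ∧ neg_d'.items = Z1' ++ (solveAltPay key p cur []).2 ++ Z2
      ∧ (∀ kv ∈ Z1', kv.2 = 0)
      ∧ neg_d'.items.map Prod.fst = neg_d.items.map Prod.fst
      ∧ (∀ k', k' ≠ key → pos_d'.getD k' 0 = pos_d.getD k' 0) := by
  induction cur with
  | nil =>
    intro Z1 Z2 neg_d pos_d key p ans hitems hnd hZ1 hZ2 hcur hp hppos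
    refine ⟨Z1, pos_d, neg_d, ?_, by simpa using hitems, hZ1, rfl, fun _ _ => rfl⟩
    have hskip := pvInner_skip pos_d neg_d key (Z2.map Prod.fst) [] ans
      (fun k hk => by
        obtain ⟨kv, hkv, hfst⟩ := List.mem_map.mp hk
        have hm : kv ∈ neg_d.items := by rw [hitems]; simp [hkv]
        rw [← hfst]
        exact pvGetD_zero neg_d hnd kv hm (hZ2 kv hkv))
    simp only [List.map_nil, List.nil_append]
    rw [← List.append_nil (Z2.map Prod.fst)] 
    rw [hskip]
    simp [solveInner, solveAltPay, pvJoin_nil, String.append_empty]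
  | cons kv rest ih =>
    intro Z1 Z2 neg_d pos_d key p ans hitems hnd hZ1 hZ2 hcur hp hppos
    obtain ⟨k, v⟩ := kv
    have hitems' : neg_d.items = Z1 ++ (k, v) :: (rest ++ Z2) := by simpa using hitems
    have hv : v < 0 := hcur (k, v) (by simp)
    have hgetk : neg_d.getD k 0 = v := pvDict_getD_at neg_d Z1 (rest ++ Z2) k v hitems' hnd
    have hrest : ∀ kv ∈ rest, kv.2 < 0 := fun kv hk => hcur kv (by simp [hk])
    simp only [List.map_cons, List.cons_append, solveInner, hgetk, hp,
      show (v = 0) = False from by simp; omega, if_false]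
    have hset := fun (w : Int) => pvDict_items_set neg_d Z1 (rest ++ Z2) k v w hitems' hnd
    by_cases hle : p + v ≤ 0
    · rw [if_pos hle]
      by_cases h0 : p + v = 0
      · refine ⟨Z1 ++ [(k, v + p)], pos_d.insert key 0, neg_d.insert k (v + p),
          ?_, ?_, ?_, ?_, ?_⟩
        · simp [solveAltPay, show ¬ p ≤ 0 by omega, h0, String.join,
            String.empty_append, String.append_assoc]
        · rw [hset (v + p)]
          simp [solveAltPay, show ¬ p ≤ 0 by omega, h0]
        · intro kv hk
          rcases List.mem_append.mp hk with h' | h'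
          · exact hZ1 kv h'
          · simp only [List.mem_singleton] at h'
            rw [h']; show v + p = 0; omega
        · rw [hset (v + p), hitems']; simp
        · intro k' hk'; exact PySem.Dict.getD_insert_of_ne pos_d _ _ hk'
      · refine ⟨Z1, pos_d.insert key 0, neg_d.insert k (v + p), ?_, ?_, hZ1, ?_, ?_⟩
        · simp [solveAltPay, show ¬ p ≤ 0 by omega, hle, h0, String.join,
            String.append_assoc]
        · rw [hset (v + p)]
          simp [solveAltPay, show ¬ p ≤ 0 by omega, hle, h0]
        · rw [hset (v + p), hitems']; simp
        · intro k' hk'; exact PySem.Dict.getD_insert_of_ne pos_d _ _ hk'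
    · rw [if_neg hle]
      have hitems2 : (neg_d.insert k 0).items = (Z1 ++ [(k, 0)]) ++ rest ++ Z2 := by
        rw [hset 0]; simp
      have hmap2 : (neg_d.insert k 0).items.map Prod.fst = neg_d.items.map Prod.fst := by
        rw [hset 0, hitems']; simp
      have hnd2 : ((neg_d.insert k 0).items.map Prod.fst).Nodup := by rw [hmap2]; exact hnd
      have hZ1' : ∀ kv ∈ Z1 ++ [(k, (0:Int))], kv.2 = 0 := by
        intro kv hk
        rcases List.mem_append.mp hk with h' | h'
        · exact hZ1 kv h'
        · simp only [List.mem_singleton] at h'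
          rw [h']
      obtain ⟨Z1'', pos'', neg'', heq, hitems'', hz'', hmap'', hpos''⟩ :=
        ih (Z1 ++ [(k, 0)]) Z2 (neg_d.insert k 0) (pos_d.insert key (p + v)) key (p + v)
          (ans ++ key ++ " should pay to " ++ k ++ " ===>>> " ++ PySem.Int.toStr (-v) ++ "
")
          hitems2 hnd2 hZ1' hZ2 hrest (PySem.Dict.getD_insert_self pos_d key (p + v) 0) (by omega)
      have hBpay : solveAltPay key p ((k, v) :: rest) [] =
          ((key ++ " should pay to " ++ k ++ " ===>>> " ++ PySem.Int.toStr (-v) ++ "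
") ::
             (solveAltPay key (p + v) rest []).1, (solveAltPay key (p + v) rest []).2) := by
        simp only [solveAltPay, show ¬ p ≤ 0 by omega, if_false, if_neg hle, List.nil_append]
        rw [pvPay_acc key (p + v) rest [_]]
        simp
      refine ⟨Z1'', pos'', neg'', ?_, ?_, hz'', ?_, ?_⟩
      · rw [heq, hBpay]
        simp [pvJoin_cons, String.append_assoc]
      · rw [hitems'', hBpay]
      · rw [hmap'', hmap2]
      · intro k' hk'
        rw [hpos'' k' hk']
        exact PySem.Dict.getD_insert_of_ne pos_d _ _ hk'

theorem pvJoin_append (a b : List String) :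
    String.join (a ++ b) = String.join a ++ String.join b := by
  induction a with
  | nil => simp [String.join, String.empty_append]
  | cons x xs ih => simp [pvJoin_cons, ih, String.append_assoc]

theorem pvOuter_sim (pos : List (String × Int)) :
    ∀ (pos_d neg_d : PySem.Dict String Int) (Z1 cur Z2 : List (String × Int)) (ans : String),
    (pos.map Prod.fst).Nodup →
    (∀ kv ∈ pos, pos_d.getD kv.1 0 = kv.2) →
    (∀ kv ∈ pos, 0 < kv.2) →
    neg_d.items = Z1 ++ cur ++ Z2 →
    (neg_d.items.map Prod.fst).Nodup →
    (∀ kv ∈ Z1, kv.2 = 0) → (∀ kv ∈ Z2, kv.2 = 0) → (∀ kv ∈ cur, kv.2 < 0) →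
    solveOuter (pos.map Prod.fst) pos_d neg_d ans
      = ans ++ String.join (solveAltLoop pos cur []) := by
  induction pos with
  | nil =>
    intros
    simp [solveOuter, solveAltLoop, pvJoin_nil, String.append_empty]
  | cons kv rest ih =>
    intro pos_d neg_d Z1 cur Z2 ans hndp hget hposv hitems hnd hZ1 hZ2 hcur
    obtain ⟨key, p⟩ := kv
    have hkeys : neg_d.keys = Z1.map Prod.fst ++ (cur.map Prod.fst ++ Z2.map Prod.fst) := by
      simp [PySem.Dict.keys, hitems]
    obtain ⟨Z1', pos_d', neg_d', heq, hitems', hz', hmap', hpos'⟩ :=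
      pvInner_sim cur Z1 Z2 neg_d pos_d key p ans hitems hnd hZ1 hZ2 hcur
        (hget (key, p) (by simp)) (hposv (key, p) (by simp))
    have hskip : solveInner pos_d key neg_d.keys neg_d ans
        = solveInner pos_d key (cur.map Prod.fst ++ Z2.map Prod.fst) neg_d ans := by
      rw [hkeys]
      exact pvInner_skip pos_d neg_d key (Z1.map Prod.fst) _ ans
        (fun k hk => by
          obtain ⟨kv, hkv, hfst⟩ := List.mem_map.mp hk
          have hm : kv ∈ neg_d.items := by rw [hitems]; simp [hkv]
          rw [← hfst]
          exact pvGetD_zero neg_d hnd kv hm (hZ1 kv hkv))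
    have hkey_notin : key ∉ rest.map Prod.fst := (List.nodup_cons.mp (by simpa using hndp)).1
    have hndp' : (rest.map Prod.fst).Nodup := (List.nodup_cons.mp (by simpa using hndp)).2
    simp only [List.map_cons, solveOuter]
    rw [hskip, heq]
    have hIH := ih pos_d' neg_d' Z1' (solveAltPay key p cur []).2 Z2
      (ans ++ String.join (solveAltPay key p cur []).1) hndp'
      (fun kv hk => by
        have hne : kv.1 ≠ key := fun he => hkey_notin (he ▸ List.mem_map_of_mem hk)
        rw [hpos' kv.1 hne]; exact hget kv (by simp [hk]))
      (fun kv hk => hposv kv (by simp [hk]))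
      hitems' (by rw [hmap']; exact hnd) hz' hZ2
      (pvPay_neg key p cur [] hcur)
    simp only [hIH]
    simp only [solveAltLoop]
    rw [pvLoop_acc rest (solveAltPay key p cur []).2 (solveAltPay key p cur []).1]
    rw [pvJoin_append, String.append_assoc]

theorem pvFilterFstNodup (d : List (String × Int)) (f : String × Int → Bool)
    (h : (d.map Prod.fst).Nodup) : ((d.filter f).map Prod.fst).Nodup :=
  List.Nodup.sublist (List.Sublist.map Prod.fst (List.filter_sublist (l := d))) h

theorem pvSortedFstNodup (l : List (String × Int)) (rev : Bool)
    (h : (l.map Prod.fst).Nodup) :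
    ((PySem.List.sorted l (fun kv => kv.2) rev).map Prod.fst).Nodup :=
  ((PySem.List.sorted_perm l (fun kv => kv.2) rev).map Prod.fst).nodup_iff.mpr h

theorem solve_eq_alt (d : List (String × Int)) (hpre : (d.map Prod.fst).Nodup) :
    solve d = solve_alt d := by
  have hsplit := pvSplit d PySem.Dict.empty PySem.Dict.empty hpre
    (fun kv _ => ⟨PySem.Dict.contains_empty _, PySem.Dict.contains_empty _⟩)
  simp only [solve, solve_alt]
  rw [hsplit.1, hsplit.2]
  simp only [show (PySem.Dict.empty : PySem.Dict String Int).items = [] from rfl,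
    List.nil_append]
  -- positive side
  have hposnd : ((PySem.List.sorted (d.filter (fun kv => kv.2 > 0)) (fun kv => kv.2) true).map
      Prod.fst).Nodup := pvSortedFstNodup _ _ (pvFilterFstNodup d _ hpre)
  have hpositems := pvOfList_items _ hposnd
  have hnegnd : ((PySem.List.sorted (d.filter (fun kv => kv.2 ≤ 0)) (fun kv => kv.2) false).map
      Prod.fst).Nodup := pvSortedFstNodup _ _ (pvFilterFstNodup d _ hpre)
  have hnegitems := pvOfList_items _ hnegnd
  obtain ⟨Z2, hN, hz2⟩ := pvNonposSplit
    (PySem.List.sorted (d.filter (fun kv => kv.2 ≤ 0)) (fun kv => kv.2) false)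
    (PySem.List.sorted_pairwise _ _)
    (fun kv hk => by
      have := List.of_mem_filter ((PySem.List.mem_sorted _ _ _ _).mp hk)
      simpa using this)
  have hkeys : (PySem.Dict.ofList (PySem.List.sorted (d.filter (fun kv => kv.2 > 0))
      (fun kv => kv.2) true)).keys
      = (PySem.List.sorted (d.filter (fun kv => kv.2 > 0)) (fun kv => kv.2) true).map Prod.fst := by
    simp [PySem.Dict.keys, hpositems]
  rw [hkeys]
  rw [pvOuter_sim _ _ _ []
      ((PySem.List.sorted (d.filter (fun kv => kv.2 ≤ 0)) (fun kv => kv.2) false).filter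
        (fun kv => kv.2 < 0)) Z2 _
    hposnd
    (fun kv hk => PySem.Dict.getD_of_mem_items _
      (by rw [hpositems]; simpa using hk)
      (by simpa [PySem.Dict.keys, hpositems] using hposnd) 0)
    (fun kv hk => by
      have := List.of_mem_filter ((PySem.List.mem_sorted _ _ _ _).mp hk)
      simpa using this)
    (by rw [hnegitems, List.nil_append]; exact hN)
    (by simpa [hnegitems] using hnegnd)
    (by simp)
    hz2
    (fun kv hk => by simpa using List.of_mem_filter hk)]

-- ===== VERDICT (by name: the statement is the Claim_ definition above) =====
theorem solve_spec : Claim_equal_solve := by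
  intro d _ hpre
  exact solve_eq_alt d hpre
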